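-- pv_equiv track=rewrite | github.com/Udbhav514/System_Software_Assignments | A3_220101106/Task1.py | check_permutations
-- ===== SOURCE A (Python) =====
-- def check_permutations(perm_list):
--     valid_permutations = []
--     for perm in perm_list:
--         temporary = []  # Stack to keep track of elements to be compared.
--         # List to represent the elements in their original order.
--         current = list(range(1, len(perm) + 1))
--         k = 0
--         for i in range(len(perm)):
--             # Add the current element to the stack.
--             temporary.append(current[i])
--             # Check if the top element in the stack matches the current element.
--             while temporary and temporary[-1] == perm[k]:
--                 # If they match, remove the element from the stack.
--                 temporary.pop()
--                 k += 1  # Move to the next element in the permutation.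
--         if not temporary:  # If the stack is empty, the permutation is valid.
--             valid_permutations.append(perm)
--
--     return valid_permutations
-- ===== SOURCE B (Python) =====
-- def _has_312(perm):
--     # exists i < j < k with perm[j] < perm[k] < perm[i]?
--     # best = max of perm[:j]; for each later k check perm[j] < perm[k] < best.
--     best = 0
--     found = False
--     for j, x in enumerate(perm):
--         if any(x < y < best for y in perm[j + 1:]):
--             found = True
--         best = max(best, x)
--     return found
--
--
-- def check_permutations(perm_list):
--     # A permutation is a realizable stack pop sequence iff it is a genuine
--     # permutation of 1..n and avoids the 312 pattern.
--     result = []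
--     for perm in perm_list:
--         if sorted(perm) == list(range(1, len(perm) + 1)) and not _has_312(perm):
--             result.append(perm)
--     return result
-- ===== Notes on version B (the rewrite author's own statement) =====
-- stated objective: alternative
-- what changed: Replaces the incremental push/pop stack simulation by a declarative characterization: keep a list iff it is a genuine permutation of 1..n (sorted(perm) == range check) and it avoids the 312 pattern (no i<j<k with perm[j] < perm[k] < perm[i]), tested by a prefix-max pair scan.
import Mathlib
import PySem

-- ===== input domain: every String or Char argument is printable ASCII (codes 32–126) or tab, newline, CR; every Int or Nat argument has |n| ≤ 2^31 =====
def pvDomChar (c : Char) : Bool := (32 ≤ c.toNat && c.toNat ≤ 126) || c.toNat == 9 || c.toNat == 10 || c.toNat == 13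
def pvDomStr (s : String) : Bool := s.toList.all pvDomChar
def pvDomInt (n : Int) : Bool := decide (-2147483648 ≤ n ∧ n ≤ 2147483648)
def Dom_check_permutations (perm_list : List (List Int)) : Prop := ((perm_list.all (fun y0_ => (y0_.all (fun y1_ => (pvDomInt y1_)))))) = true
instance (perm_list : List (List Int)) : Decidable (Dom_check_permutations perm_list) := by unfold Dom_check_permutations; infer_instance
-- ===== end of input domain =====

-- B replaces A's incremental stack simulation by the declarative characterization:
-- keep a list iff it is a permutation of 1..n that avoids the 312 pattern (alternative, not faster).

-- ===== PORT A =====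
-- Inner loop 'while temporary and temporary[-1] == perm[k]': Python appends/pops at the
-- right end; here the stack is kept head-first (head = top).  perm[k] is read as p[k]?:
-- Python's perm[k] never raises an IndexError, because the guard requires a nonempty
-- stack, which forces k < len(perm) (pops never exceed pushes).
def popA (p : List Int) : List Int → Nat → List Int × Nat
  | [], k => ([], k)
  | t :: rest, k => if p[k]? = some t then popA p rest (k + 1) else (t :: rest, k)

def stepA (p : List Int) (s : List Int × Nat) (v : Int) : List Int × Nat :=
  popA p (v :: s.1) s.2

-- 'for i in range(len(perm)): temporary.append(current[i]); while …' walks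
-- current = list(range(1, len(perm)+1)) element by element
def simA (p : List Int) : Bool :=
  ((PySem.List.pyRange 1 ((p.length : Int) + 1) 1).foldl (stepA p) ([], 0)).1.isEmpty

def check_permutations (perm_list : List (List Int)) : List (List Int) :=
  perm_list.foldl (fun acc perm => if simA perm then acc ++ [perm] else acc) []

-- ===== PORT B =====
-- 'any(x < y < best for y in perm[j+1:])' over the suffix, then 'best = max(best, x)'
def has312Go : List Int → Int → Bool → Bool
  | [], _, found => found
  | x :: rest, best, found =>
      has312Go rest (max best x) (found || rest.any (fun y => decide (x < y) && decide (y < best)))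

def has312 (p : List Int) : Bool := has312Go p 0 false

def check_permutations_alt (perm_list : List (List Int)) : List (List Int) :=
  perm_list.foldl (fun acc perm =>
    if PySem.List.sorted perm (fun x => x) false
         = PySem.List.pyRange 1 ((perm.length : Int) + 1) 1 ∧ has312 perm = false
    then acc ++ [perm] else acc) []

-- ===== PRECONDITION & SPEC =====
def Spec_check_permutations (perm_list : List (List Int)) (out : List (List Int)) : Prop := out = check_permutations_alt perm_list
instance (perm_list : List (List Int)) (out : List (List Int)) : Decidable (Spec_check_permutations perm_list out) := by unfold Spec_check_permutations; infer_instance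

-- ===== CLAIM (what is proved, stated in full; the proofs are below) =====
def Claim_equal_check_permutations : Prop := ∀ (perm_list : List (List Int)), Dom_check_permutations perm_list → Spec_check_permutations perm_list (check_permutations perm_list)

-- ===== LEMMAS AND PROOFS =====

-- the values 1..n as a list of Ints
def pvals (n : Nat) : List Int := PySem.List.pyRange 1 ((n : Int) + 1) 1
-- max of a list (0 if empty)
def pMax (l : List Int) : Int := l.foldl max 0
-- p[j] with default 0
def pd (p : List Int) (j : Nat) : Int := p.getD j 0
-- max of p[0..j]
def Mx (p : List Int) (j : Nat) : Int := pMax (p.take (j + 1))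
-- feasibility = 312-avoidance phrased for the simulation: any later, larger element
-- exceeds the prefix max
def Feas (p : List Int) : Prop :=
  ∀ j kk, j < kk → kk < p.length → pd p j < pd p kk → Mx p j < pd p kk
-- simulation invariant at level m with state s = (stack, k)
def SimInv (p : List Int) (m : Nat) (s : List Int × Nat) : Prop :=
  s.2 ≤ p.length ∧ (p.take s.2).Nodup ∧ (∀ x ∈ p.take s.2, 1 ≤ x ∧ x ≤ (m : Int)) ∧
  (∀ v : Int, v ∈ s.1 ↔ (1 ≤ v ∧ v ≤ (m : Int) ∧ v ∉ p.take s.2)) ∧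
  s.1.Pairwise (· > ·) ∧
  (∀ j, j < s.2 → ∀ y : Int, pd p j < y → y ≤ Mx p j → y ∈ p.take j)
-- the inner while loop's postcondition
def Post (p : List Int) (s : List Int × Nat) : Prop :=
  ∀ t rest, s.1 = t :: rest → ¬ (p[s.2]? = some t)
-- completeness bookkeeping: every pop due by level m has happened
def DoneBy (p : List Int) (m : Nat) (k : Nat) : Prop :=
  ∀ j, j < p.length → Mx p j ≤ (m : Int) → j < k

theorem le_foldl_max_init (l : List Int) (a : Int) : a ≤ l.foldl max a := by
  induction l generalizing a with
  | nil => simp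
  | cons x t ih => exact le_trans (le_max_left a x) (ih (max a x))

theorem le_foldl_max_mem (l : List Int) (a x : Int) (h : x ∈ l) : x ≤ l.foldl max a := by
  induction l generalizing a with
  | nil => simp at h
  | cons y t ih =>
    rcases List.mem_cons.1 h with h | h
    · subst h; exact le_trans (le_max_right a x) (le_foldl_max_init t (max a x))
    · exact ih _ h

theorem foldl_max_le (l : List Int) (a c : Int) (ha : a ≤ c) (h : ∀ x ∈ l, x ≤ c) :
    l.foldl max a ≤ c := by
  induction l generalizing a with
  | nil => simpa using ha
  | cons y t ih =>
    exact ih (max a y) (max_le ha (h y (by simp))) (fun x hx => h x (by simp [hx]))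

theorem foldl_max_cases (l : List Int) (a : Int) : l.foldl max a = a ∨ l.foldl max a ∈ l := by
  induction l generalizing a with
  | nil => simp
  | cons y t ih =>
    rcases ih (max a y) with h | h
    · simp only [List.foldl_cons]
      rcases max_cases a y with ⟨h2, _⟩ | ⟨h2, _⟩
      · left; rw [h, h2]
      · right; rw [h, h2]; simp
    · right; simp only [List.foldl_cons]; exact List.mem_cons_of_mem _ h

theorem take_succ_pd (p : List Int) (k : Nat) (hk : k < p.length) :
    p.take (k + 1) = p.take k ++ [pd p k] := by
  rw [List.take_add_one]
  simp [pd, List.getElem?_eq_getElem hk]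

theorem Mx_eq (p : List Int) (k : Nat) (hk : k < p.length) :
    Mx p k = max (pMax (p.take k)) (pd p k) := by
  unfold Mx pMax
  rw [take_succ_pd p k hk, List.foldl_append]
  simp [List.foldl]

theorem Mx_mono (p : List Int) (j j' : Nat) (h : j ≤ j') : Mx p j ≤ Mx p j' := by
  unfold Mx pMax
  have h1 : p.take (j + 1) = (p.take (j' + 1)).take (j + 1) := by
    rw [List.take_take]; congr 1; omega
  rw [h1]
  conv_rhs => rw [← List.take_append_drop (j + 1) (p.take (j' + 1))]
  rw [List.foldl_append]
  exact le_foldl_max_init _ _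

theorem mem_pvals (n : Nat) (v : Int) : v ∈ pvals n ↔ 1 ≤ v ∧ v ≤ (n : Int) := by
  unfold pvals
  rw [PySem.List.mem_pyRange_one]
  omega

theorem pd_eq_getElem (p : List Int) (j : Nat) (hj : j < p.length) : pd p j = p[j] := by
  simp [pd, List.getD_eq_getElem?_getD, List.getElem?_eq_getElem hj]

theorem pd_mem (p : List Int) (j : Nat) (hj : j < p.length) : pd p j ∈ p := by
  rw [pd_eq_getElem p j hj]; exact List.getElem_mem hj

theorem mem_take_of_lt (p : List Int) (i k : Nat) (hi : i < k) (hk : k ≤ p.length) :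
    pd p i ∈ p.take k := by
  have hi' : i < p.length := by omega
  have h1 : i < (p.take k).length := by simp; omega
  have h2 : (p.take k)[i] = p[i] := List.getElem_take
  rw [pd_eq_getElem p i hi', ← h2]
  exact List.getElem_mem h1

theorem take_dup_absurd (p : List Int) (hnd : p.Nodup) (j kk : Nat) (hj : j ≤ kk)
    (hkk : kk < p.length) (h : pd p kk ∈ p.take j) : False := by
  rcases List.getElem_of_mem h with ⟨i, hi, hie⟩
  have hil : i < (p.take j).length := hi
  have hij : i < j := by simp at hil; omega
  have hi' : i < p.length := by omega
  rw [List.getElem_take] at hie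
  rw [pd_eq_getElem p kk hkk] at hie
  have := (List.Nodup.getElem_inj_iff hnd).1 hie
  omega

theorem pd_le_Mx (p : List Int) (j : Nat) (hj : j < p.length) : pd p j ≤ Mx p j := by
  unfold Mx pMax
  exact le_foldl_max_mem _ _ _ (by rw [take_succ_pd p j hj]; simp)

theorem pMax_take_le_Mx (p : List Int) (j : Nat) : pMax (p.take j) ≤ Mx p j := by
  unfold Mx pMax
  have h1 : p.take j = (p.take (j + 1)).take j := by rw [List.take_take]; congr 1; omega
  rw [h1]
  conv_rhs => rw [← List.take_append_drop j (p.take (j + 1))]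
  rw [List.foldl_append]
  exact le_foldl_max_init _ _

theorem Mx_le_of_bounds (p : List Int) (j : Nat) (c : Int) (hc : 0 ≤ c)
    (h : ∀ x ∈ p, x ≤ c) : Mx p j ≤ c := by
  unfold Mx pMax
  exact foldl_max_le _ _ _ hc (fun x hx => h x (List.mem_of_mem_take hx))


-- single pop preserves the invariant
theorem pop_one (p : List Int) (m : Nat) (t : Int) (rest : List Int) (k : Nat)
    (hJ : SimInv p m (t :: rest, k)) (hm : p[k]? = some t) : SimInv p m (rest, k + 1) := by
  obtain ⟨h1, h2, h3, h4, h5, h6⟩ := hJ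
  rcases List.getElem?_eq_some_iff.1 hm with ⟨hk, ht⟩
  have pdk : pd p k = t := by rw [pd_eq_getElem p k hk, ht]
  have htake : p.take (k + 1) = p.take k ++ [t] := by rw [take_succ_pd p k hk, pdk]
  have tprop : 1 ≤ t ∧ t ≤ (m : Int) ∧ t ∉ p.take k := (h4 t).1 (by simp)
  have hrest_lt : ∀ v ∈ rest, v < t := fun v hv => List.rel_of_pairwise_cons h5 hv
  refine ⟨by omega, ?_, ?_, ?_, List.Pairwise.of_cons h5, ?_⟩
  · rw [htake, List.nodup_append]
    refine ⟨h2, List.nodup_singleton t, ?_⟩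
    intro a ha b hb
    rw [List.mem_singleton] at hb
    subst hb
    exact fun he => tprop.2.2 (he ▸ ha)
  · intro x hx
    rw [htake] at hx
    rcases List.mem_append.1 hx with hx | hx
    · exact h3 x hx
    · simp at hx; subst hx; exact ⟨tprop.1, tprop.2.1⟩
  · intro v
    constructor
    · intro hv
      have hvs := (h4 v).1 (List.mem_cons_of_mem t hv)
      have hvt : v < t := hrest_lt v hv
      refine ⟨hvs.1, hvs.2.1, ?_⟩
      rw [htake]
      intro hmem
      rcases List.mem_append.1 hmem with hmem | hmem
      · exact hvs.2.2 hmem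
      · simp at hmem; omega
    · rintro ⟨hv1, hv2, hv3⟩
      rw [htake] at hv3
      have hvk : v ∉ p.take k := fun h => hv3 (List.mem_append.2 (Or.inl h))
      have hvt : v ≠ t := fun h => hv3 (List.mem_append.2 (Or.inr (by simp [h])))
      have := (h4 v).2 ⟨hv1, hv2, hvk⟩
      rcases List.mem_cons.1 this with h | h
      · exact absurd h hvt
      · exact h
  · intro j hj y hy1 hy2
    rcases Nat.lt_or_ge j k with hjk | hjk
    · exact h6 j hjk y hy1 hy2
    · have hjeq : j = k := by omega
      subst hjeq
      rw [pdk] at hy1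
      rw [Mx_eq p j hk, pdk] at hy2
      have hyA : y ≤ pMax (p.take j) := by
        rcases max_cases (pMax (p.take j)) t with ⟨he, _⟩ | ⟨he, hle⟩
        · omega
        · omega
      by_contra hny
      have hy_pos : 1 ≤ y := by omega
      have hyM : y ≤ (m : Int) := by
        have : pMax (p.take j) ≤ (m : Int) := by
          unfold pMax
          exact foldl_max_le _ _ _ (by positivity) (fun x hx => (h3 x hx).2)
        omega
      have hyst : y ∈ t :: rest := (h4 y).2 ⟨hy_pos, hyM, hny⟩
      rcases List.mem_cons.1 hyst with h | h
      · omega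
      · have := hrest_lt y h; omega

-- the while loop preserves the invariant and establishes its postcondition
theorem popA_inv (p : List Int) (m : Nat) (st : List Int) (k : Nat)
    (hJ : SimInv p m (st, k)) : SimInv p m (popA p st k) ∧ Post p (popA p st k) := by
  induction st generalizing k with
  | nil =>
    refine ⟨hJ, ?_⟩
    intro t rest h
    cases h
  | cons t rest ih =>
    have heq : popA p (t :: rest) k
        = if p[k]? = some t then popA p rest (k + 1) else (t :: rest, k) := rfl
    by_cases hm : p[k]? = some t
    · rw [heq, if_pos hm]
      exact ih (k + 1) (pop_one p m t rest k hJ hm)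
    · rw [heq, if_neg hm]
      refine ⟨hJ, ?_⟩
      intro t' r' heq
      cases heq
      exact hm

-- pushing m+1 onto the stack keeps the invariant at level m+1
theorem push_inv (p : List Int) (m : Nat) (s : List Int × Nat)
    (_hm : m < p.length) (hJ : SimInv p m s) :
    SimInv p (m + 1) ((((m : Int) + 1) :: s.1), s.2) := by
  obtain ⟨h1, h2, h3, h4, h5, h6⟩ := hJ
  refine ⟨h1, h2, ?_, ?_, ?_, h6⟩
  · intro x hx
    have := h3 x hx
    push_cast
    omega
  · intro v
    push_cast
    constructor
    · intro hv
      rcases List.mem_cons.1 hv with hv | hv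
      · subst hv
        refine ⟨by omega, le_refl _, ?_⟩
        intro hmem
        have := h3 _ hmem
        omega
      · have := (h4 v).1 hv
        exact ⟨this.1, by omega, this.2.2⟩
    · rintro ⟨hv1, hv2, hv3⟩
      by_cases hveq : v = (m : Int) + 1
      · exact List.mem_cons.2 (Or.inl hveq)
      · exact List.mem_cons.2 (Or.inr ((h4 v).2 ⟨hv1, by omega, hv3⟩))
  · refine List.pairwise_cons.2 ⟨?_, h5⟩
    intro v hv
    have := (h4 v).1 hv
    omega


-- one push + while preserves the invariant
theorem step_inv (p : List Int) (m : Nat) (s : List Int × Nat)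
    (hm : m < p.length) (hJ : SimInv p m s) :
    SimInv p (m + 1) (stepA p s ((m : Int) + 1)) ∧ Post p (stepA p s ((m : Int) + 1)) := by
  exact popA_inv p (m + 1) (((m : Int) + 1) :: s.1) s.2 (push_inv p m s hm hJ)

-- completeness: under Perm + Feas the while loop performs every due pop
theorem pnodup (p : List Int) (hP : p.Perm (pvals p.length)) : p.Nodup :=
  hP.nodup_iff.2 (by unfold pvals; exact PySem.List.nodup_pyRange_one _ _)

theorem pmem (p : List Int) (hP : p.Perm (pvals p.length)) (v : Int) :
    v ∈ p ↔ 1 ≤ v ∧ v ≤ (p.length : Int) := by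
  rw [hP.mem_iff, mem_pvals]

-- the stuck-at-k contradiction: if some due index j ≥ k remains, the stack head must
-- be exactly p[k] (so the while loop would have popped it)
theorem popA_comp (p : List Int) (m : Nat) (st : List Int) (k : Nat)
    (hP : p.Perm (pvals p.length)) (hF : Feas p)
    (hJ : SimInv p (m + 1) (st, k)) (hm1 : m + 1 ≤ p.length)
    (hD : DoneBy p m k) : DoneBy p (m + 1) (popA p st k).2 := by
  have hnd := pnodup p hP
  induction st generalizing k with
  | nil =>
    rw [show popA p [] k = ([], k) from rfl]
    intro j hj hMj
    by_contra hjk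
    have hkj : k ≤ j := by omega
    have hk : k < p.length := by omega
    have hMk : Mx p k ≤ ((m + 1 : Nat) : Int) := le_trans (Mx_mono p k j hkj) hMj
    have hpd1 : 1 ≤ pd p k ∧ pd p k ≤ (p.length : Int) := (pmem p hP _).1 (pd_mem p k hk)
    have hpdM : pd p k ≤ ((m + 1 : Nat) : Int) := le_trans (pd_le_Mx p k hk) hMk
    have hpdnt : pd p k ∉ p.take k := fun h => take_dup_absurd p hnd k k (le_refl k) hk h
    obtain ⟨_, _, _, h4, _, _⟩ := hJ
    have : pd p k ∈ ([] : List Int) := (h4 (pd p k)).2 ⟨hpd1.1, by exact_mod_cast hpdM, hpdnt⟩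
    simp at this
  | cons t rest ih =>
    have heq : popA p (t :: rest) k
        = if p[k]? = some t then popA p rest (k + 1) else (t :: rest, k) := rfl
    by_cases hmm : p[k]? = some t
    · rw [heq, if_pos hmm]
      exact ih (k + 1) (pop_one p (m + 1) t rest k hJ hmm)
        (fun j hj hMj => by have := hD j hj hMj; omega)
    · rw [heq, if_neg hmm]
      intro j hj hMj
      by_contra hjk
      have hkj : k ≤ j := by omega
      have hk : k < p.length := by omega
      have hMk : Mx p k ≤ ((m + 1 : Nat) : Int) := le_trans (Mx_mono p k j hkj) hMj
      have hMk_gt : (m : Int) < Mx p k := by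
        by_contra hle
        exact absurd (hD k hk (by omega)) (by omega)
      have hpd1 : 1 ≤ pd p k ∧ pd p k ≤ (p.length : Int) := (pmem p hP _).1 (pd_mem p k hk)
      have hpdM : pd p k ≤ ((m + 1 : Nat) : Int) := le_trans (pd_le_Mx p k hk) hMk
      have hpdnt : pd p k ∉ p.take k := fun h => take_dup_absurd p hnd k k (le_refl k) hk h
      obtain ⟨h1, h2, h3, h4, h5, h6⟩ := hJ
      have hpdst : pd p k ∈ t :: rest :=
        (h4 (pd p k)).2 ⟨hpd1.1, by exact_mod_cast hpdM, hpdnt⟩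
      rcases List.mem_cons.1 hpdst with hcase | hcase
      · -- head is exactly p[k]: the loop would have popped
        apply hmm
        rw [List.getElem?_eq_getElem hk, ← pd_eq_getElem p k hk, hcase]
      · -- head t is larger than p[k]; it sits later in p, contradicting Feas
        have hlt : pd p k < t := List.rel_of_pairwise_cons h5 hcase
        have htst : t ∈ t :: rest := List.mem_cons_self
        have htb := (h4 t).1 htst
        have htmem : t ∈ p := (pmem p hP t).2 ⟨htb.1, le_trans htb.2.1 (by exact_mod_cast hm1)⟩
        rcases List.getElem_of_mem htmem with ⟨q, hq, hqe⟩
        have hpdq : pd p q = t := by rw [pd_eq_getElem p q hq, hqe]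
        have hqk : k < q := by
          rcases Nat.lt_trichotomy q k with hlt' | heq' | hgt'
          · exfalso
            exact htb.2.2 (hpdq ▸ mem_take_of_lt p q k hlt' (by omega))
          · exfalso; rw [heq'] at hpdq; omega
          · exact hgt'
        have := hF k q hqk hq (by omega)
        rw [hpdq] at this
        have hMkk : Mx p k = ((m + 1 : Nat) : Int) := by push_cast at hMk_gt hMk ⊢; omega
        rw [hMkk] at this
        have hble : t ≤ ((m + 1 : Nat) : Int) := htb.2.1
        push_cast at this hble
        omega

theorem fold_inv (p : List Int) (m : Nat) (hm : m ≤ p.length) :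
    SimInv p m ((PySem.List.pyRange 1 ((m : Int) + 1) 1).foldl (stepA p) ([], 0)) ∧
    Post p ((PySem.List.pyRange 1 ((m : Int) + 1) 1).foldl (stepA p) ([], 0)) := by
  revert hm
  induction m with
  | zero =>
    intro _
    rw [PySem.List.pyRange_one_eq_nil (by norm_num)]
    refine ⟨⟨by simp, by simp, by simp, ?_, by simp, by simp⟩, ?_⟩
    · intro v
      simp only [List.foldl_nil]
      constructor
      · intro h; simp at h
      · rintro ⟨h1, h2, _⟩; exfalso; omega
    · intro t rest h
      simp at h
  | succ m ih =>
    intro hm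
    have hm' : m < p.length := by omega
    have hrange : PySem.List.pyRange 1 (((m + 1 : Nat) : Int) + 1) 1
        = PySem.List.pyRange 1 ((m : Int) + 1) 1 ++ [(m : Int) + 1] := by
      push_cast
      exact PySem.List.pyRange_one_succ_right (by omega)
    rw [hrange, List.foldl_append, List.foldl_cons, List.foldl_nil]
    have hprev := ih (by omega)
    have hstep := step_inv p m _ hm' hprev.1
    exact hstep

theorem Mx_ge_one (p : List Int) (hP : p.Perm (pvals p.length)) (j : Nat)
    (hj : j < p.length) : 1 ≤ Mx p j := by
  have h1 := (pmem p hP _).1 (pd_mem p j hj)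
  have := pd_le_Mx p j hj
  omega

theorem fold_comp (p : List Int) (hP : p.Perm (pvals p.length)) (hF : Feas p)
    (m : Nat) (hm : m ≤ p.length) :
    DoneBy p m ((PySem.List.pyRange 1 ((m : Int) + 1) 1).foldl (stepA p) ([], 0)).2 := by
  revert hm
  induction m with
  | zero =>
    intro _ j hj hMj
    exfalso
    have := Mx_ge_one p hP j hj
    omega
  | succ m ih =>
    intro hm
    have hm' : m < p.length := by omega
    have hrange : PySem.List.pyRange 1 (((m + 1 : Nat) : Int) + 1) 1
        = PySem.List.pyRange 1 ((m : Int) + 1) 1 ++ [(m : Int) + 1] := by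
      push_cast
      exact PySem.List.pyRange_one_succ_right (by omega)
    rw [hrange, List.foldl_append, List.foldl_cons, List.foldl_nil]
    have hprev := fold_inv p m (by omega)
    have hpush := push_inv p m _ hm' hprev.1
    exact popA_comp p m _ _ hP hF hpush (by omega) (ih (by omega))

theorem simA_fwd (p : List Int) (h : simA p = true) : p.Perm (pvals p.length) ∧ Feas p := by
  obtain ⟨⟨h1, h2, h3, h4, h5, h6⟩, _⟩ := fold_inv p p.length (le_refl _)
  unfold simA at h
  rw [List.isEmpty_iff] at h
  set s := (PySem.List.pyRange 1 ((p.length : Int) + 1) 1).foldl (stepA p) ([], 0) with hs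
  -- the stack is empty, so every value 1..n was popped: k = n and p is a permutation
  have hsub : pvals p.length ⊆ p.take s.2 := by
    intro v hv
    rcases (mem_pvals p.length v).1 hv with ⟨hv1, hv2⟩
    by_contra hnv
    have : v ∈ s.1 := (h4 v).2 ⟨hv1, hv2, hnv⟩
    rw [h] at this
    simp at this
  have hlenv : (pvals p.length).length = p.length := by
    unfold pvals
    rw [PySem.List.length_pyRange_one]
    omega
  have hnv : (pvals p.length).Nodup := by
    unfold pvals; exact PySem.List.nodup_pyRange_one _ _
  have hk : s.2 = p.length := by
    have hsp := (List.subperm_of_subset hnv hsub).length_le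
    rw [hlenv] at hsp
    have : (p.take s.2).length ≤ s.2 := by simp
    omega
  have htakes : p.take s.2 = p := by rw [hk, List.take_length]
  rw [htakes] at h2 h3 h4
  have hperm : p.Perm (pvals p.length) := by
    rw [List.perm_ext_iff_of_nodup h2 hnv]
    intro a
    constructor
    · intro ha
      have := h3 a ha
      exact (mem_pvals p.length a).2 this
    · intro ha
      have := hsub ha
      rw [htakes] at this
      exact this
  refine ⟨hperm, ?_⟩
  intro j kk hjk hkk hlt
  by_contra hge
  have hj : j < p.length := by omega
  have hmem := h6 j (by omega) (pd p kk) hlt (by omega)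
  exact take_dup_absurd p h2 j kk (by omega) hkk hmem

theorem simA_bwd (p : List Int) (hP : p.Perm (pvals p.length)) (hF : Feas p) :
    simA p = true := by
  obtain ⟨⟨h1, h2, h3, h4, h5, h6⟩, _⟩ := fold_inv p p.length (le_refl _)
  have hD := fold_comp p hP hF p.length (le_refl _)
  unfold simA
  rw [List.isEmpty_iff]
  set s := (PySem.List.pyRange 1 ((p.length : Int) + 1) 1).foldl (stepA p) ([], 0) with hs
  have hk : s.2 = p.length := by
    have hge : p.length ≤ s.2 := by
      by_contra hlt
      have hMle : Mx p s.2 ≤ (p.length : Int) := by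
        apply Mx_le_of_bounds p s.2 _ (by positivity)
        intro x hx
        exact ((pmem p hP x).1 hx).2
      exact absurd (hD s.2 (by omega) hMle) (by omega)
    omega
  rw [List.eq_nil_iff_forall_not_mem]
  intro v hv
  have hb := (h4 v).1 hv
  rw [hk, List.take_length] at hb
  exact hb.2.2 ((pmem p hP v).2 ⟨hb.1, hb.2.1⟩)

theorem sortedCheck_iff (p : List Int) :
    PySem.List.sorted p (fun x => x) false = PySem.List.pyRange 1 ((p.length : Int) + 1) 1
      ↔ p.Perm (pvals p.length) := by
  constructor
  · intro h
    have hs := PySem.List.sorted_perm p (fun x : Int => x) false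
    rw [h] at hs
    exact hs.symm
  · intro hP
    exact PySem.List.sorted_eq_of_perm_of_pairwise_lt _ _ _ hP.symm
      (PySem.List.pairwise_lt_pyRange_one _ _)

theorem has312Go_true (l : List Int) (best : Int) : has312Go l best true = true := by
  induction l generalizing best with
  | nil => rfl
  | cons x rest ih =>
    show has312Go rest (max best x) (true || _) = true
    rw [Bool.true_or]
    exact ih _

theorem has312Go_iff (l : List Int) (best : Int) :
    has312Go l best false = true ↔
      ∃ j kk, j < kk ∧ kk < l.length ∧ l.getD j 0 < l.getD kk 0 ∧
        l.getD kk 0 < (l.take j).foldl max best := by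
  induction l generalizing best with
  | nil =>
    constructor
    · intro h; cases h
    · rintro ⟨j, kk, _, hkk, _, _⟩; simp at hkk
  | cons x rest ih =>
    show has312Go rest (max best x)
        (false || rest.any (fun y => decide (x < y) && decide (y < best))) = true ↔ _
    rw [Bool.false_or]
    by_cases hA : rest.any (fun y => decide (x < y) && decide (y < best)) = true
    · rw [hA, has312Go_true]
      simp only [true_iff]
      rcases List.any_eq_true.1 hA with ⟨y, hy, hcond⟩
      rcases List.getElem_of_mem hy with ⟨i, hi, hie⟩
      simp only [Bool.and_eq_true, decide_eq_true_eq] at hcond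
      refine ⟨0, i + 1, by omega, by simp; omega, ?_, ?_⟩
      · rw [List.getD_cons_zero, List.getD_cons_succ,
          List.getD_eq_getElem rest 0 hi, hie]
        exact hcond.1
      · rw [List.getD_cons_succ, List.getD_eq_getElem rest 0 hi, hie]
        simpa using hcond.2
    · rw [Bool.not_eq_true] at hA
      rw [hA, ih (max best x)]
      constructor
      · rintro ⟨j, kk, hjk, hkk, hlt, hmax⟩
        refine ⟨j + 1, kk + 1, by omega, by simp; omega, ?_, ?_⟩
        · rwa [List.getD_cons_succ, List.getD_cons_succ]
        · rw [List.getD_cons_succ, List.take_succ_cons, List.foldl_cons]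
          exact hmax
      · rintro ⟨j, kk, hjk, hkk, hlt, hmax⟩
        match j, kk with
        | 0, kk + 1 =>
          exfalso
          rw [List.getD_cons_zero, List.getD_cons_succ] at hlt
          rw [List.getD_cons_succ, List.take_zero, List.foldl_nil] at hmax
          have hkk' : kk < rest.length := by simpa using hkk
          have hmem : rest.getD kk 0 ∈ rest := by
            rw [List.getD_eq_getElem rest 0 hkk']
            exact List.getElem_mem hkk'
          have : rest.any (fun y => decide (x < y) && decide (y < best)) = true :=
            List.any_eq_true.2 ⟨rest.getD kk 0, hmem,
              by simp only [Bool.and_eq_true, decide_eq_true_eq]; exact ⟨hlt, hmax⟩⟩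
          rw [hA] at this
          cases this
        | j + 1, kk + 1 =>
          rw [List.getD_cons_succ, List.getD_cons_succ] at hlt
          rw [List.getD_cons_succ, List.take_succ_cons, List.foldl_cons] at hmax
          exact ⟨j, kk, by omega, by simpa using hkk, hlt, hmax⟩

theorem has312_iff (p : List Int) (hP : p.Perm (pvals p.length)) :
    has312 p = false ↔ Feas p := by
  have hnd := pnodup p hP
  unfold has312
  rw [Bool.eq_false_iff, Ne, has312Go_iff]
  constructor
  · intro hno j kk hjk hkk hlt
    by_contra hge
    apply hno
    have hj : j < p.length := lt_trans hjk hkk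
    have hMx : p.getD kk 0 ≤ max (pMax (p.take j)) (p.getD j 0) := by
      have h0 : pd p kk ≤ Mx p j := not_lt.1 hge
      rw [Mx_eq p j hj] at h0
      exact h0
    have hA : p.getD kk 0 ≤ pMax (p.take j) := by
      rcases le_max_iff.1 hMx with h | h
      · exact h
      · exact absurd hlt (not_lt.2 h)
    have h1 : (1 : Int) ≤ p.getD kk 0 := ((pmem p hP _).1 (pd_mem p kk hkk)).1
    rcases foldl_max_cases (p.take j) 0 with hc | hc
    · exfalso
      have hzero : pMax (p.take j) = 0 := hc
      omega
    · have hne : p.getD kk 0 ≠ pMax (p.take j) := fun he =>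
        take_dup_absurd p hnd j kk (le_of_lt hjk) hkk
          (by rw [show pd p kk = p.getD kk 0 from rfl, he]; exact hc)
      exact ⟨j, kk, hjk, hkk, hlt, lt_of_le_of_ne hA hne⟩
  · rintro hF ⟨j, kk, hjk, hkk, hlt, hmax⟩
    have h2 : p.getD kk 0 < pMax (p.take j) := hmax
    have h3 : Mx p j < p.getD kk 0 := hF j kk hjk hkk hlt
    have h4 := pMax_take_le_Mx p j
    omega

theorem cond_iff (p : List Int) :
    simA p = true ↔
      (PySem.List.sorted p (fun x => x) false = PySem.List.pyRange 1 ((p.length : Int) + 1) 1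
        ∧ has312 p = false) := by
  constructor
  · intro h
    rcases simA_fwd p h with ⟨hP, hF⟩
    exact ⟨(sortedCheck_iff p).2 hP, (has312_iff p hP).2 hF⟩
  · rintro ⟨h1, h2⟩
    have hP := (sortedCheck_iff p).1 h1
    exact simA_bwd p hP ((has312_iff p hP).1 h2)

theorem fold_eq (perm_list : List (List Int)) (acc : List (List Int)) :
    perm_list.foldl (fun acc perm => if simA perm then acc ++ [perm] else acc) acc =
    perm_list.foldl (fun acc perm =>
      if PySem.List.sorted perm (fun x => x) false
           = PySem.List.pyRange 1 ((perm.length : Int) + 1) 1 ∧ has312 perm = false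
      then acc ++ [perm] else acc) acc := by
  induction perm_list generalizing acc with
  | nil => rfl
  | cons p t ih =>
    simp only [List.foldl_cons]
    rw [show (if simA p then acc ++ [p] else acc)
          = (if PySem.List.sorted p (fun x => x) false
               = PySem.List.pyRange 1 ((p.length : Int) + 1) 1 ∧ has312 p = false
             then acc ++ [p] else acc) by
      by_cases h : simA p = true
      · rw [if_pos h, if_pos ((cond_iff p).1 h)]
      · rw [if_neg (by simpa using h), if_neg (fun hc => h ((cond_iff p).2 hc))]]
    exact ih _

-- ===== VERDICT (by name: the statement is the Claim_ definition above) =====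
theorem check_permutations_spec : Claim_equal_check_permutations := by
  intro perm_list _
  unfold Spec_check_permutations check_permutations check_permutations_alt
  exact fold_eq perm_list []
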